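-- pv_equiv track=rewrite | github.com/shlomog12/research-algorithms | home_works/hw7/q3.py | bli_8
-- ===== SOURCE A (Python) =====
-- def get_first(num):
--     return int(str(num)[0])
--
-- def len_of(num):
--     return len(str(num))
--
-- def get_rest(num):
--     if len_of(num) == 1:
--         return 0
--     return int(str(num)[1:])
--
-- def bli_8_by_len(n):
--     return 9**n
--
-- def bli_8(num, bed=8):
--     if num == 0:
--         return 1
--     n = len_of(num)
--     ans = 0
--     first = get_first(num)
--     for i in range(first):
--         if i != bed:
--             ans += bli_8_by_len(n-1)
--     if first == bed:
--         return ans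
--     ans += bli_8(get_rest(num),bed)
--     return ans
-- ===== SOURCE B (Python) =====
-- def bli_8(num, bed=8):
--     # Iterative accumulator loop instead of recursion; the per-digit inner loop
--     # is replaced by a closed-form count of the allowed smaller leading digits.
--     ans = 0
--     while num != 0:
--         s = str(num)
--         n = len(s)
--         first = int(s[0])
--         block = 9 ** (n - 1)
--         ans += (first - (1 if 0 <= bed < first else 0)) * block
--         if first == bed:
--             return ans
--         num = int(s[1:]) if n > 1 else 0
--     return ans + 1
-- ===== Notes on version B (the rewrite author's own statement) =====
-- stated objective: simpler
-- what changed: Replaced the four-helper recursion with a single iterative while-loop threading an accumulator, and replaced the inner for-loop over range(first) with a closed-form count of allowed leading digits.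
import Mathlib
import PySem

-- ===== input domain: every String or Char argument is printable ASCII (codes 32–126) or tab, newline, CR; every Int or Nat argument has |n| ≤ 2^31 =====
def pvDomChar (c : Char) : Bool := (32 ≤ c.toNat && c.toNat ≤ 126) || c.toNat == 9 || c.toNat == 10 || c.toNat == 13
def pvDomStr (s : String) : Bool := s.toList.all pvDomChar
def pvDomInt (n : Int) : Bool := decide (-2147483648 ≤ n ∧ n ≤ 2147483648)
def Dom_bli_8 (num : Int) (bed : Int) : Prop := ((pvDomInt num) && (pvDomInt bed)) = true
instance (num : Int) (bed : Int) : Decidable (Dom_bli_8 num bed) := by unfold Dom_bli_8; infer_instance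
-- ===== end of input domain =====

-- B replaces A's four-helper recursion by one iterative accumulator loop whose inner
-- digit loop is a closed-form count (objective: simpler). Return values only; no mutation.

-- ===== PORT A =====
-- int(str(num)[0]); `.getD 0` is unreachable under Pre_ (str(num) is nonempty and all digits for num ≥ 0)
def get_first (num : Int) : Int :=
  ((PySem.List.pyGet? (PySem.Int.toChars num) 0).bind
    (fun c => PySem.Int.ofChars? [c])).getD 0

def len_of (num : Int) : Int := PySem.List.len (PySem.Int.toChars num)

-- int(str(num)[1:]); `.getD 0` unreachable under Pre_ (the tail is all digits)
def get_rest (num : Int) : Int :=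
  if len_of num = 1 then 0
  else (PySem.Int.ofChars? (PySem.List.slice (PySem.Int.toChars num) (some 1) none)).getD 0

-- 9**n; `.toNat` is exact since the exponent n-1 = len(str(num))-1 is never negative
def bli_8_by_len (n : Int) : Int := 9 ^ n.toNat

-- fuel num.toNat + 1 is a totality guard only: each recursive step strictly decreases a
-- positive num (rest = num mod 10^(d-1) < num), so the 0-fuel branch is never reached under Pre_
def bli_8_go : Nat → Int → Int → Int
  | 0, _, _ => 0
  | fuel + 1, num, bed =>
    if num = 0 then 1
    else
      let n := len_of num
      let first := get_first num
      let ans := (PySem.List.pyRange 0 first 1).foldl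
        (fun a i => if i ≠ bed then a + bli_8_by_len (n - 1) else a) 0
      if first = bed then ans
      else ans + bli_8_go fuel (get_rest num) bed

def bli_8 (num : Int) (bed : Int) : Int := bli_8_go (num.toNat + 1) num bed

-- ===== PORT B =====
-- the while-loop of Source B with its accumulator `ans`; same fuel guard as above
def bli_8_alt_go : Nat → Int → Int → Int → Int
  | 0, _, _, ans => ans
  | fuel + 1, num, bed, ans =>
    if num = 0 then ans + 1
    else
      let s := PySem.Int.toChars num
      let n := PySem.List.len s
      let first := ((PySem.List.pyGet? s 0).bind (fun c => PySem.Int.ofChars? [c])).getD 0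
      let block := (9 : Int) ^ (n - 1).toNat
      let ans' := ans + (first - (if 0 ≤ bed ∧ bed < first then 1 else 0)) * block
      if first = bed then ans'
      else
        bli_8_alt_go fuel
          (if 1 < n then (PySem.Int.ofChars? (PySem.List.slice s (some 1) none)).getD 0 else 0)
          bed ans'

def bli_8_alt (num : Int) (bed : Int) : Int := bli_8_alt_go (num.toNat + 1) num bed 0

-- ===== PRECONDITION & SPEC =====
-- Pre_ excludes num < 0, where BOTH Pythons raise ValueError (int("-…"[0]) = int("-")).
def Pre_bli_8 (num : Int) (bed : Int) : Prop := 0 ≤ num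
instance (num : Int) (bed : Int) : Decidable (Pre_bli_8 num bed) := by unfold Pre_bli_8; infer_instance
def pvWitness_bli_8 : Int × Int := (13, 8)

def Spec_bli_8 (num : Int) (bed : Int) (out : Int) : Prop := out = bli_8_alt num bed
instance (num : Int) (bed : Int) (out : Int) : Decidable (Spec_bli_8 num bed out) := by unfold Spec_bli_8; infer_instance

-- ===== CLAIM (what is proved, stated in full; the proofs are below) =====
def Claim_equal_bli_8 : Prop := ∀ (num : Int) (bed : Int), Dom_bli_8 num bed → Pre_bli_8 num bed → Spec_bli_8 num bed (bli_8 num bed)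

-- ===== LEMMAS AND PROOFS =====

theorem toDigitsCore_ne_nil (b : Nat) :
    ∀ (f n : Nat) (acc : List Char), (acc ≠ [] ∨ 0 < f) → Nat.toDigitsCore b f n acc ≠ [] := by
  intro f
  induction f with
  | zero =>
    intro n acc h
    simp only [Nat.toDigitsCore]
    rcases h with h | h
    · exact h
    · omega
  | succ f ih =>
    intro n acc h
    simp only [Nat.toDigitsCore]
    split
    · exact List.cons_ne_nil _ _
    · exact ih _ _ (Or.inl (List.cons_ne_nil _ _))

theorem bind_some_cast_nonneg (o : Option Nat) (x : Int)
    (h : (o.bind fun a => some ((a : Int))) = some x) : 0 ≤ x := by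
  cases o with
  | none => simp at h
  | some a =>
    simp only [Option.bind_some, Option.some.injEq] at h
    subst h
    positivity

theorem map_bind_cast_nonneg (o : Option Nat) (x : Int)
    (h : Option.map (fun n : Int => n) (do let a ← o; pure ((a : Int))) = some x) : 0 ≤ x := by
  cases o with
  | none => simp at h
  | some a =>
    simp only [Option.map_some, Option.some.injEq, Option.pure_def, bind, Option.bind] at h
    subst h
    positivity

theorem ofChars?_single_nonneg (c : Char) (x : Int)
    (hc : c ≠ '-') (h : PySem.Int.ofChars? [c] = some x) : 0 ≤ x := by
  unfold PySem.Int.ofChars? at h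
  by_cases hs : PySem.Int.isIntSpace c = true
  · simp [hs] at h
    exact bind_some_cast_nonneg _ _ h
  · simp only [List.dropWhile, hs, List.reverse_cons, List.reverse_nil,
      List.nil_append] at h
    split at h
    · rename_i ds heq
      exact absurd (List.head_eq_of_cons_eq heq) (by simpa using hc)
    · exact map_bind_cast_nonneg _ _ h
    · exact map_bind_cast_nonneg _ _ h

theorem get_first_nonneg (num : Int) : 0 ≤ get_first num := by
  unfold get_first
  cases hg : PySem.List.pyGet? (PySem.Int.toChars num) 0 with
  | none => simp
  | some c =>
    cases ho : PySem.Int.ofChars? [c] with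
    | none => simp [ho]
    | some x =>
      simp only [Option.bind_some, ho, Option.getD_some]
      by_cases hc : c = '-'
      · subst hc
        rw [show PySem.Int.ofChars? ['-'] = none from by decide] at ho
        cases ho
      · exact ofChars?_single_nonneg c x hc ho

theorem toChars_ne_nil (num : Int) : PySem.Int.toChars num ≠ [] := by
  unfold PySem.Int.toChars Nat.toDigits
  split
  · exact List.cons_ne_nil _ _
  · exact toDigitsCore_ne_nil 10 _ _ _ (Or.inr (Nat.succ_pos _))

-- closed form for A's inner loop over range(first)
theorem loop_sum (f : Nat) (bed p : Int) :
    (PySem.List.pyRange 0 (f : Int) 1).foldl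
        (fun a i => if i ≠ bed then a + p else a) 0
      = ((f : Int) - (if 0 ≤ bed ∧ bed < (f : Int) then 1 else 0)) * p := by
  induction f with
  | zero =>
    rw [show PySem.List.pyRange 0 ((0:Nat):Int) 1 = [] from by decide]
    simp only [List.foldl_nil, Nat.cast_zero]
    rw [if_neg (by omega)]
    ring
  | succ f ih =>
    have h1 : ((f + 1 : Nat) : Int) = (f : Int) + 1 := by push_cast; ring
    rw [h1, PySem.List.pyRange_one_succ_right (by positivity), List.foldl_append]
    simp only [List.foldl_cons, List.foldl_nil]
    rw [ih]
    split_ifs <;> first | (exfalso; omega) | ring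

theorem loop_sum' (F bed p : Int) (hF : 0 ≤ F) :
    (PySem.List.pyRange 0 F 1).foldl
        (fun a i => if i ≠ bed then a + p else a) 0
      = (F - (if 0 ≤ bed ∧ bed < F then 1 else 0)) * p := by
  obtain ⟨m, rfl⟩ := Int.eq_ofNat_of_zero_le hF
  exact loop_sum m bed p

theorem go_eq (fuel : Nat) : ∀ (num bed ans : Int),
    bli_8_alt_go fuel num bed ans = ans + bli_8_go fuel num bed := by
  induction fuel with
  | zero => intro num bed ans; simp [bli_8_alt_go, bli_8_go]
  | succ f ih =>
    intro num bed ans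
    by_cases h0 : num = 0
    · simp [bli_8_alt_go, bli_8_go, h0]
    · simp only [bli_8_alt_go, bli_8_go, if_neg h0]
      unfold get_rest get_first bli_8_by_len len_of
      simp only [PySem.List.len_eq]
      have hF : (0:Int) ≤
          ((PySem.List.pyGet? (PySem.Int.toChars num) 0).bind
            (fun c => PySem.Int.ofChars? [c])).getD 0 := get_first_nonneg num
      rw [loop_sum' _ bed _ hF]
      have hlen : 1 ≤ (PySem.Int.toChars num).length :=
        List.length_pos_iff.mpr (toChars_ne_nil num)
      by_cases hL : ((PySem.Int.toChars num).length : Int) = 1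
      · simp only [hL]
        norm_num
        split_ifs <;> (try rw [ih]) <;> (try ring)
      · have h1 : (1:Int) < ((PySem.Int.toChars num).length : Int) := by
          omega
        simp only [hL, h1, if_true, if_false]
        split_ifs <;> (try rw [ih]) <;> (try ring)

-- ===== VERDICT (by name: the statement is the Claim_ definition above) =====
theorem bli_8_spec : Claim_equal_bli_8 := by
  intro num bed _ _
  unfold Spec_bli_8 bli_8 bli_8_alt
  rw [go_eq]
  ring
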